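-- pv_equiv track=rewrite | github.com/whzhangg/autoSymTB | src/automaticTB/solve/sitesymmetry/dress_operation.py | _organize_by_index
-- ===== SOURCE A (Python) =====
-- def _organize_by_index(items, indics) -> list:
--     sets = {}
--     for i, ref in enumerate(indics):
--         sets.setdefault(ref, []).append(i)
--     item_set = []
--     for s in sets.values():
--         item_set.append([ items[i] for i in s ])
--     return item_set
-- ===== SOURCE B (Python) =====
-- def _organize_by_index(items, indics) -> list:
--     seen = []
--     for r in indics:
--         if r not in seen:
--             seen.append(r)
--     return [[items[i] for i, r in enumerate(indics) if r == ref] for ref in seen]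
-- ===== Notes on version B (the rewrite author's own statement) =====
-- stated objective: simpler
-- what changed: Replaces the setdefault dict that accumulates index lists with a first-appearance dedup of the refs followed by one fresh scan of indics per distinct ref; no dict is built.
import Mathlib
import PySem

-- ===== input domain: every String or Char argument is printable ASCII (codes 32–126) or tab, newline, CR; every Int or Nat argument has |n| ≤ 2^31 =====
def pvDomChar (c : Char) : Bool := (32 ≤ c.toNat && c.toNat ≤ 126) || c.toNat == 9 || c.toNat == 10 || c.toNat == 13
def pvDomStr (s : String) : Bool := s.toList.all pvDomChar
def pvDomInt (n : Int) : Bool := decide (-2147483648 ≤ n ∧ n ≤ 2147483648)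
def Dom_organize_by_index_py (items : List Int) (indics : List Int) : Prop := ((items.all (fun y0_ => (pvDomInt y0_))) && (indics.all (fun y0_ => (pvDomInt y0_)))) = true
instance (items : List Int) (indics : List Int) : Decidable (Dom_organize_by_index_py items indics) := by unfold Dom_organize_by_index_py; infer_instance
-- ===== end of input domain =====

-- B groups items by their ref using a first-appearance dedup of refs plus one scan per distinct
-- ref, instead of A's setdefault-dict of index lists; same value everywhere both return.

-- ===== PORT A =====
-- sets = {}; for i, ref in enumerate(indics): sets.setdefault(ref, []).append(i)
-- item_set = []; for s in sets.values(): item_set.append([items[i] for i in s])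
-- items[i] is ported as pyGet? with default 0; Pre_ excludes the inputs where Python raises IndexError.
def organize_by_index_py (items : List Int) (indics : List Int) : List (List Int) :=
  let sets : PySem.Dict Int (List Int) :=
    (PySem.List.enumerate indics 0).foldl
      (fun d p => d.modify p.2 [] (fun v => v ++ [p.1])) PySem.Dict.empty
  sets.values.foldl
    (fun item_set s => item_set ++ [s.map (fun i => (PySem.List.pyGet? items i).getD 0)]) []

-- ===== PORT B =====
-- seen = first-appearance distinct refs; one comprehension scan of enumerate(indics) per ref.
def organize_by_index_py_alt (items : List Int) (indics : List Int) : List (List Int) :=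
  let seen : List Int := PySem.Set.ofList indics
  seen.map (fun ref =>
    ((PySem.List.enumerate indics 0).filter (fun p => p.2 == ref)).map
      (fun p => (PySem.List.pyGet? items p.1).getD 0))

-- ===== PRECONDITION & SPEC =====
-- Pre_: Python A raises IndexError on items[i] when indics is longer than items; excluded.
def Pre_organize_by_index_py (items : List Int) (indics : List Int) : Prop :=
  indics.length ≤ items.length
instance (items : List Int) (indics : List Int) : Decidable (Pre_organize_by_index_py items indics) := by unfold Pre_organize_by_index_py; infer_instance
def pvWitness_organize_by_index_py : List Int × List Int := ([10, 20, 30], [5, 7, 5])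

def Spec_organize_by_index_py (items : List Int) (indics : List Int) (out : List (List Int)) : Prop := out = organize_by_index_py_alt items indics
instance (items : List Int) (indics : List Int) (out : List (List Int)) : Decidable (Spec_organize_by_index_py items indics out) := by unfold Spec_organize_by_index_py; infer_instance

-- ===== CLAIM (what is proved, stated in full; the proofs are below) =====
def Claim_equal_organize_by_index_py : Prop := ∀ (items : List Int) (indics : List Int), Dom_organize_by_index_py items indics → Pre_organize_by_index_py items indics → Spec_organize_by_index_py items indics (organize_by_index_py items indics)

-- ===== LEMMAS AND PROOFS =====

-- the accumulating second loop of A is a map over sets.values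
theorem pv_foldl_append_map (f : List Int → List Int) (vs : List (List Int)) (acc : List (List Int)) :
    vs.foldl (fun item_set s => item_set ++ [f s]) acc = acc ++ vs.map f := by
  induction vs generalizing acc with
  | nil => simp
  | cons v vs ih => simp [List.foldl_cons, ih, List.append_assoc]

-- the dict built by A: keys and per-key contents
theorem pv_sets_eq (indics : List Int) :
    (PySem.List.enumerate indics 0).foldl
      (fun d p => d.modify p.2 [] (fun v => v ++ [p.1])) (PySem.Dict.empty : PySem.Dict Int (List Int))
    = ((PySem.List.enumerate indics 0).map (fun p => (p.2, p.1))).foldl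
      (fun d q => d.modify q.1 [] (fun v => v ++ [q.2])) PySem.Dict.empty := by
  rw [List.foldl_map]

-- ===== VERDICT (by name: the statement is the Claim_ definition above) =====

theorem organize_by_index_py_spec : Claim_equal_organize_by_index_py := by
  intro items indics _ _
  unfold Spec_organize_by_index_py organize_by_index_py organize_by_index_py_alt
  set enum := PySem.List.enumerate indics 0 with henum
  set sets : PySem.Dict Int (List Int) :=
    enum.foldl (fun d p => d.modify p.2 [] (fun v => v ++ [p.1])) PySem.Dict.empty with hsets
  have hnodup : sets.keys.Nodup := by
    rw [hsets]
    exact PySem.Dict.nodup_keys_foldl_modify_key enum (·.2) [] (fun d p => (· ++ [p.1]))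
      PySem.Dict.empty (by simp [PySem.Dict.keys_empty])
  have hkeys : sets.keys = PySem.Set.ofList indics := by
    rw [hsets, PySem.Dict.keys_foldl_modify_key]
    simp [PySem.Dict.keys_empty, PySem.Set.update_nil_left, henum,
      PySem.List.map_snd_enumerate]
  have hgetD : ∀ ref : Int, sets.getD ref [] =
      (enum.filter (fun p => p.2 == ref)).map (fun p => p.1) := by
    intro ref
    rw [hsets, pv_sets_eq, PySem.Dict.getD_foldl_modify_append]
    simp [List.filter_map, List.map_map, Function.comp_def]
    rw [henum]
  rw [pv_foldl_append_map, List.nil_append,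
    PySem.Dict.values_eq_map_keys sets hnodup [], hkeys, List.map_map]
  apply List.map_congr_left
  intro ref _
  simp [Function.comp_def, hgetD ref, List.map_map]
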